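-- pv_equiv track=rewrite | github.com/RushikeshNarkhedePatil/PythonMLWithGenAI | Python Logic Building/Program975.py | toggle_case
-- ===== SOURCE A (Python) =====
-- def toggle_case(brr):
--     Result = ""
--
--     for ch in brr:
--         if ch >='A' and ch <='Z':
--             Result = Result + chr((ord(ch)+32))
--         elif ch >='a' and ch <='z':
--             Result = Result + chr((ord(ch)-32))
--         else:
--             Result = Result + ch
--
--
--     return Result
-- ===== SOURCE B (Python) =====
-- _TOGGLE_TABLE = str.maketrans(
--     {**{c: c + 32 for c in range(ord('A'), ord('Z') + 1)},
--      **{c: c - 32 for c in range(ord('a'), ord('z') + 1)}})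
--
--
-- def toggle_case(brr):
--     return brr.translate(_TOGGLE_TABLE)
-- ===== Notes on version B (the rewrite author's own statement) =====
-- stated objective: idiomatic
-- what changed: Replaces the per-character branch-and-concatenate loop by a str.maketrans translation table over the 52 ASCII letters built once, applied with str.translate in a single library pass.
import Mathlib
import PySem

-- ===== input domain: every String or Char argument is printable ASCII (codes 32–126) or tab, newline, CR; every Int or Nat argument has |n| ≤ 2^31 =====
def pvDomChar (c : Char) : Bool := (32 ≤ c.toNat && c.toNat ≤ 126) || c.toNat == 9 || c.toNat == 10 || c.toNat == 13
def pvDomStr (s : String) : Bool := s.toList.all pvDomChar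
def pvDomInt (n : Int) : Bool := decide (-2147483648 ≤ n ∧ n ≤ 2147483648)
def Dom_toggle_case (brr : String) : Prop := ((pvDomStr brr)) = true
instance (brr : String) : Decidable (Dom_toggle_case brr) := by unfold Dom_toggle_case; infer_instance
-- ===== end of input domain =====

-- B replaces A's per-character branch-and-concatenate loop by a translation table
-- (str.maketrans over the 52 ASCII letters) built once and applied with str.translate (idiomatic).

-- ===== PORT A =====
-- Result = ""; for ch in brr: branch and append; return Result  (string built as List Char)
def toggle_case (brr : String) : String :=
  String.ofList (brr.toList.foldl (fun Result ch =>
    if 'A' ≤ ch ∧ ch ≤ 'Z' then Result ++ [Char.ofNat (ch.toNat + 32)]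
    else if 'a' ≤ ch ∧ ch ≤ 'z' then Result ++ [Char.ofNat (ch.toNat - 32)]
    else Result ++ [ch]) [])

-- ===== PORT B =====
-- the maketrans table: code point ↦ toggled code point for the 52 ASCII letters
def toggleTable : PySem.Dict Nat Nat :=
  ((List.range 26).foldl (fun d i => d.insert (65 + i) (65 + i + 32)) PySem.Dict.empty
    |> fun d => (List.range 26).foldl (fun d i => d.insert (97 + i) (97 + i - 32)) d)

-- str.translate: each char is looked up by code point; unmapped chars pass through
def toggle_case_alt (brr : String) : String :=
  String.ofList (brr.toList.map (fun ch =>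
    match toggleTable.get? ch.toNat with
    | some v => Char.ofNat v
    | none => ch))

-- ===== PRECONDITION & SPEC =====
def Spec_toggle_case (brr : String) (out : String) : Prop := out = toggle_case_alt brr
instance (brr : String) (out : String) : Decidable (Spec_toggle_case brr out) := by unfold Spec_toggle_case; infer_instance

-- ===== CLAIM (what is proved, stated in full; the proofs are below) =====
def Claim_equal_toggle_case : Prop := ∀ (brr : String), Dom_toggle_case brr → Spec_toggle_case brr (toggle_case brr)

-- ===== LEMMAS AND PROOFS =====

-- the table B's foldl of inserts builds, as a literal (evaluated once)
set_option maxRecDepth 100000 in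
theorem toggleTable_eq : toggleTable = PySem.Dict.mk [(65, 97), (66, 98), (67, 99), (68, 100), (69, 101), (70, 102), (71, 103), (72, 104), (73, 105), (74, 106), (75, 107), (76, 108), (77, 109), (78, 110), (79, 111), (80, 112), (81, 113), (82, 114), (83, 115), (84, 116), (85, 117), (86, 118), (87, 119), (88, 120), (89, 121), (90, 122), (97, 65), (98, 66), (99, 67), (100, 68), (101, 69), (102, 70), (103, 71), (104, 72), (105, 73), (106, 74), (107, 75), (108, 76), (109, 77), (110, 78), (111, 79), (112, 80), (113, 81), (114, 82), (115, 83), (116, 84), (117, 85), (118, 86), (119, 87), (120, 88), (121, 89), (122, 90)] := by decide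

-- per-character agreement on the ASCII domain, over the literal table
set_option maxRecDepth 4000 in
theorem toggle_char_eq_lit : ∀ n : Nat, n < 128 →
    (if 'A' ≤ Char.ofNat n ∧ Char.ofNat n ≤ 'Z' then Char.ofNat ((Char.ofNat n).toNat + 32)
     else if 'a' ≤ Char.ofNat n ∧ Char.ofNat n ≤ 'z' then Char.ofNat ((Char.ofNat n).toNat - 32)
     else Char.ofNat n)
    = (match (PySem.Dict.mk [(65, 97), (66, 98), (67, 99), (68, 100), (69, 101), (70, 102), (71, 103), (72, 104), (73, 105), (74, 106), (75, 107), (76, 108), (77, 109), (78, 110), (79, 111), (80, 112), (81, 113), (82, 114), (83, 115), (84, 116), (85, 117), (86, 118), (87, 119), (88, 120), (89, 121), (90, 122), (97, 65), (98, 66), (99, 67), (100, 68), (101, 69), (102, 70), (103, 71), (104, 72), (105, 73), (106, 74), (107, 75), (108, 76), (109, 77), (110, 78), (111, 79), (112, 80), (113, 81), (114, 82), (115, 83), (116, 84), (117, 85), (118, 86), (119, 87), (120, 88), (121, 89), (122, 90)] : PySem.Dict Nat Nat).get? (Char.ofNat n).toNat with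
       | some v => Char.ofNat v
       | none => Char.ofNat n) := by decide

-- per-character agreement on the ASCII domain
theorem toggle_char_eq : ∀ n : Nat, n < 128 →
    (if 'A' ≤ Char.ofNat n ∧ Char.ofNat n ≤ 'Z' then Char.ofNat ((Char.ofNat n).toNat + 32)
     else if 'a' ≤ Char.ofNat n ∧ Char.ofNat n ≤ 'z' then Char.ofNat ((Char.ofNat n).toNat - 32)
     else Char.ofNat n)
    = (match toggleTable.get? (Char.ofNat n).toNat with
       | some v => Char.ofNat v
       | none => Char.ofNat n) := by
  intro n hn
  rw [toggleTable_eq]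
  exact toggle_char_eq_lit n hn

-- ===== VERDICT (by name: the statement is the Claim_ definition above) =====
set_option maxRecDepth 100000 in
theorem toggle_case_spec : Claim_equal_toggle_case := by
  intro brr hdom
  unfold Spec_toggle_case toggle_case toggle_case_alt
  have hbody : (fun (Result : List Char) (ch : Char) =>
      if 'A' ≤ ch ∧ ch ≤ 'Z' then Result ++ [Char.ofNat (ch.toNat + 32)]
      else if 'a' ≤ ch ∧ ch ≤ 'z' then Result ++ [Char.ofNat (ch.toNat - 32)]
      else Result ++ [ch])
      = fun Result ch => Result ++ [if 'A' ≤ ch ∧ ch ≤ 'Z' then Char.ofNat (ch.toNat + 32)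
          else if 'a' ≤ ch ∧ ch ≤ 'z' then Char.ofNat (ch.toNat - 32) else ch] := by
    funext Result ch; split_ifs <;> rfl
  rw [hbody, PySem.List.foldl_append_singleton_eq_map, List.nil_append]
  apply congrArg String.ofList
  apply List.map_congr_left
  intro c hc
  have hd : pvDomChar c = true := (List.all_eq_true.mp hdom) c hc
  have hlt : c.toNat < 128 := by simp [pvDomChar] at hd; omega
  have := toggle_char_eq c.toNat hlt
  rwa [Char.ofNat_toNat] at this
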